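-- pv_equiv track=rewrite | github.com/YuriSizuku/GalgameReverse | src/majiro/tool/mjotool2/_util.py | repl_tabs
-- ===== SOURCE A (Python) =====
-- def repl_tabs(string:str, tab_size:int=4, space:str=' ') -> str:
--     """Replace tabs in a string with accurate space equivalents
--
--     Does NOT handle proper spacing of fullwidth characters or emoji
--     """
--     if tab_size == 1:
--         return string.replace('\t', space) # no difference
--     indent = 0
--     parts = []
--
--     last_tab = 0  # stored as idx+1 for easier math
--     tab = string.find('\t')
--     while tab != -1:
--         if tab != last_tab:  # append normal string parts
--             indent += tab - last_tab
--             parts.append(string[last_tab:tab])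
--
--         new_indent = (indent // tab_size + 1) * tab_size
--         parts.append(space * (new_indent - indent))
--         indent = new_indent
--
--         last_tab = tab + 1  # store as idx+1 for easier math
--         tab = string.find('\t', tab + 1)
--
--     if not parts:
--         return string  # no tabs
--
--     if last_tab != len(string):  # append final string part
--         parts.append(string[last_tab:])
--     return ''.join(parts)
-- ===== SOURCE B (Python) =====
-- def repl_tabs(string: str, tab_size: int = 4, space: str = ' ') -> str:
--     """Replace tabs in a string with accurate space equivalents
--     (single flat scan keeping a running column; no newline reset,
--     matching the original's string-wide column counting)."""
--     out = []
--     col = 0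
--     for ch in string:
--         if ch == '\t':
--             stop = (col // tab_size + 1) * tab_size
--             out.append(space * (stop - col))
--             col = stop
--         else:
--             out.append(ch)
--             col += 1
--     return ''.join(out)
-- ===== Notes on version B (the rewrite author's own statement) =====
-- stated objective: simpler
-- what changed: A finds each tab with str.find and stitches slices between stored indices (last_tab/parts bookkeeping plus a special-cased str.replace path for tab_size 1); B is one flat per-character scan carrying a running column, with the tab-stop formula handling every tab_size uniformly.
import Mathlib
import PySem

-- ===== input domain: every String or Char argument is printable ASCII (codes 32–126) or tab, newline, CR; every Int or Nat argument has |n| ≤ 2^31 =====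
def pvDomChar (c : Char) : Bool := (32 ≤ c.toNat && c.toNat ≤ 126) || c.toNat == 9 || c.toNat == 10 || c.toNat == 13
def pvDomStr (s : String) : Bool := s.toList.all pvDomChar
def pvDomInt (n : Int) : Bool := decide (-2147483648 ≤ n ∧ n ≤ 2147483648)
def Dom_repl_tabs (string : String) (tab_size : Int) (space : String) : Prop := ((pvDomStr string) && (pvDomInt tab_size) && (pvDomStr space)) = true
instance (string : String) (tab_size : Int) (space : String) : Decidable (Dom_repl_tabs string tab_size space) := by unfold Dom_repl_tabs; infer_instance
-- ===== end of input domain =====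

-- B replaces A's find-based segment splitting (find('\t'), slice bookkeeping with last_tab/parts)
-- by one flat per-character scan carrying the running column; objective: simpler.
-- ===== PORT A =====
-- Python's 'while tab != -1' loop; last_tab (always a valid index+1, kept as Nat),
-- state (indent, last_tab, parts).  The outer 'if hlt' is only a totality guard
-- (last_tab ≤ len always holds on every actual call; Python has no such test).
def replTabsLoop (cs sp : List Char) (ts : Int) (last_tab : Nat) (indent : Int)
    (parts : List (List Char)) : Int × Nat × List (List Char) :=
  if hlt : last_tab ≤ cs.length then
    have tab := PySem.Chars.findFrom cs ['\t'] (last_tab : Int)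
    if htab : tab = -1 then (indent, last_tab, parts)
    else
      have t : Nat := tab.toNat
      have parts1 := if t ≠ last_tab then
          parts ++ [PySem.Chars.slice cs (some (last_tab : Int)) (some (t : Int))] else parts
      have indent1 := if t ≠ last_tab then indent + ((t : Int) - (last_tab : Int)) else indent
      have new_indent := (PySem.Int.floordiv indent1 ts + 1) * ts
      have parts2 := parts1 ++ [PySem.List.pyRepeat sp (new_indent - indent1)]
      replTabsLoop cs sp ts (t + 1) new_indent parts2
  else (indent, last_tab, parts)
termination_by cs.length + 1 - last_tab
decreasing_by
  have hs := PySem.Chars.findFrom_natCast_spec cs ['\t'] last_tab hlt htab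
  have h1 : (last_tab : Int) ≤ PySem.Chars.findFrom cs ['\t'] (last_tab : Int) := hs.1
  have h2 := hs.2.1
  have hlen : (PySem.Chars.findFrom cs ['\t'] (last_tab : Int)).toNat < cs.length := by
    have := h2.length_le
    simp at this
    omega
  omega

def repl_tabs (string : String) (tab_size : Int) (space : String) : String :=
  if tab_size = 1 then PySem.Str.replace string "\t" space
  else
    let cs := string.toList
    let r := replTabsLoop cs space.toList tab_size 0 0 []
    if r.2.2 = [] then string
    else
      let parts := if r.2.1 ≠ cs.length then
          r.2.2 ++ [PySem.Chars.slice cs (some ((r.2.1 : Int))) none] else r.2.2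
      String.ofList (PySem.Chars.join [] parts)

-- ===== PORT B =====
-- one pass over the characters, carrying the running column
def replTabsAltGo (ts : Int) (sp : List Char) : List Char → Int → List Char
  | [], _ => []
  | c :: rest, col =>
    if c = '\t' then
      have stop := (PySem.Int.floordiv col ts + 1) * ts
      PySem.List.pyRepeat sp (stop - col) ++ replTabsAltGo ts sp rest stop
    else c :: replTabsAltGo ts sp rest (col + 1)

def repl_tabs_alt (string : String) (tab_size : Int) (space : String) : String :=
  String.ofList (replTabsAltGo tab_size space.toList string.toList 0)

-- ===== PRECONDITION & SPEC =====
-- Pre_ excludes exactly the inputs on which Python A raises ZeroDivisionError: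
-- tab_size = 0 with at least one tab in the string (with no tab the division is never reached).
def Pre_repl_tabs (string : String) (tab_size : Int) (space : String) : Prop :=
  tab_size ≠ 0 ∨ '\t' ∉ string.toList
instance (string : String) (tab_size : Int) (space : String) : Decidable (Pre_repl_tabs string tab_size space) := by unfold Pre_repl_tabs; infer_instance
def pvWitness_repl_tabs : String × Int × String := ("a\tbc\td", 4, " ")

def Spec_repl_tabs (string : String) (tab_size : Int) (space : String) (out : String) : Prop := out = repl_tabs_alt string tab_size space
instance (string : String) (tab_size : Int) (space : String) (out : String) : Decidable (Spec_repl_tabs string tab_size space out) := by unfold Spec_repl_tabs; infer_instance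

-- ===== CLAIM (what is proved, stated in full; the proofs are below) =====
def Claim_equal_repl_tabs : Prop := ∀ (string : String) (tab_size : Int) (space : String), Dom_repl_tabs string tab_size space → Pre_repl_tabs string tab_size space → Spec_repl_tabs string tab_size space (repl_tabs string tab_size space)

-- ===== LEMMAS AND PROOFS =====

theorem join_empty_sep (ps : List (List Char)) : PySem.Chars.join [] ps = ps.flatten := by
  induction ps with
  | nil => simp [PySem.Chars.join_nil]
  | cons a t ih =>
    cases t with
    | nil => simp [PySem.Chars.join_singleton]
    | cons b r => rw [PySem.Chars.join_cons_cons]; simp_all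

-- B's scan is the identity on tab-free text
theorem altGo_no_tab (ts : Int) (sp l : List Char) (col : Int) (h : '\t' ∉ l) :
    replTabsAltGo ts sp l col = l := by
  induction l generalizing col with
  | nil => rfl
  | cons c r ih =>
    simp only [List.mem_cons, not_or] at h
    rw [replTabsAltGo, if_neg (fun hc => h.1 hc.symm), ih _ h.2]

-- B's scan copies a tab-free segment verbatim, advancing the column by its length
theorem altGo_append (ts : Int) (sp seg rest : List Char) (col : Int) (h : '\t' ∉ seg) :
    replTabsAltGo ts sp (seg ++ rest) col = seg ++ replTabsAltGo ts sp rest (col + seg.length) := by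
  induction seg generalizing col with
  | nil => simp
  | cons c r ih =>
    simp only [List.mem_cons, not_or] at h
    rw [List.cons_append, replTabsAltGo, if_neg (fun hc => h.1 hc.symm), ih _ h.2]
    rw [List.cons_append]
    congr 3
    simp only [List.length_cons]
    push_cast
    ring

-- A's loop never empties its parts accumulator
theorem loop_parts_ne_nil (cs sp : List Char) (ts : Int) (p : Nat) (ind : Int)
    (parts : List (List Char)) :
    parts ≠ [] → (replTabsLoop cs sp ts p ind parts).2.2 ≠ [] := by
  fun_induction replTabsLoop cs sp ts p ind parts with
  | case1 p ind parts hlt tab htab => exact id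
  | case2 p ind parts hlt tab htab t parts1 indent1 new_indent parts2 ih =>
    intro h
    exact ih (List.append_ne_nil_of_right_ne_nil _ (by simp))
  | case3 p ind parts hlt => exact id

-- main invariant: from any state, A's joined parts followed by the text after the final
-- last_tab equal the already-joined prefix followed by B's scan of the unprocessed tail
theorem loop_eq_altGo (cs sp : List Char) (ts : Int) (p : Nat) (ind : Int)
    (parts : List (List Char)) :
    p ≤ cs.length →
    ((replTabsLoop cs sp ts p ind parts).2.2).flatten
        ++ cs.drop (replTabsLoop cs sp ts p ind parts).2.1
      = parts.flatten ++ replTabsAltGo ts sp (cs.drop p) ind := by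
  fun_induction replTabsLoop cs sp ts p ind parts with
  | case1 p ind parts hlt tab htab =>
    intro _
    have hno : ¬ ['\t'] <:+: cs.drop p :=
      (PySem.Chars.findFrom_natCast_eq_neg_one_iff cs ['\t'] p hlt).mp htab
    rw [altGo_no_tab ts sp _ ind (fun hm => hno ((List.singleton_infix_iff _ _).mpr hm))]
  | case2 p ind parts hlt tab htab t parts1 indent1 new_indent parts2 ih =>
    intro _
    simp only [parts2, parts1, indent1, new_indent, t, tab] at ih ⊢
    simp only [tab] at htab
    set F := PySem.Chars.findFrom cs ['\t'] (p : Int) with hF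
    have hs := PySem.Chars.findFrom_natCast_spec cs ['\t'] p hlt htab
    have hpt : p ≤ F.toNat := by have := hs.1; omega
    have htlen : F.toNat < cs.length := by
      have := hs.2.1.length_le
      simp at this
      omega
    have hdropt : cs.drop F.toNat = '\t' :: cs.drop (F.toNat + 1) := by
      rw [List.drop_eq_getElem_cons htlen]
      have h2 := hs.2.1
      rw [List.drop_eq_getElem_cons htlen] at h2
      rcases h2 with ⟨w, hw⟩
      simp only [List.singleton_append, List.cons.injEq] at hw
      rw [hw.1]
    by_cases hne : F.toNat = p
    · -- the tab is at last_tab itself: no text part is appended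
      simp only [hne] at ih hdropt ⊢
      simp only [dif_neg (not_not_intro rfl)] at ih ⊢
      rw [ih (by omega)]
      conv_rhs => rw [hdropt, replTabsAltGo, if_pos rfl]
      simp [List.append_assoc]
    · -- a nonempty tab-free segment precedes the tab
      simp only [dif_pos hne] at ih ⊢
      have hseg : cs.drop p = (cs.drop p).take (F.toNat - p) ++ '\t' :: cs.drop (F.toNat + 1) := by
        conv_lhs => rw [← List.take_append_drop (F.toNat - p) (cs.drop p)]
        rw [List.drop_drop, Nat.add_sub_cancel' hpt, hdropt]
      have hsegtab : '\t' ∉ (cs.drop p).take (F.toNat - p) := by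
        intro hm
        rcases List.getElem_of_mem hm with ⟨i, hi, hgi⟩
        have hilt : i < F.toNat - p := by
          have := List.length_take_le (F.toNat - p) (cs.drop p)
          omega
        have hnp : ¬ ['\t'] <+: cs.drop (p + i) := hs.2.2 (p + i) (by omega) (by omega)
        apply hnp
        have hpi : p + i < cs.length := by omega
        rw [List.drop_eq_getElem_cons hpi]
        rw [List.getElem_take, List.getElem_drop] at hgi
        simp [hgi]
      have hseglen : ((cs.drop p).take (F.toNat - p)).length = F.toNat - p := by
        simp
        omega
      have hslice : PySem.Chars.slice cs (some (p : Int)) (some ((F.toNat : Int))) =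
          (cs.drop p).take (F.toNat - p) := by
        simp only [PySem.Chars.slice_eq_listSlice, PySem.List.slice_natCast]
      have hcast : ((F.toNat - p : Nat) : Int) = (F.toNat : Int) - (p : Int) := by omega
      rw [ih (by omega)]
      conv_rhs => rw [hseg, altGo_append ts sp _ _ ind hsegtab, hseglen, hcast,
        replTabsAltGo, if_pos rfl]
      rw [hslice]
      simp [List.append_assoc]
  | case3 p ind parts hlt => omega

-- the tab_size = 1 branch: Python's str.replace, characterised as a per-character map
theorem replace_go_tab (sp : List Char) (l : List Char) (fuel : Nat) (acc : List Char)
    (h : l.length ≤ fuel) :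
    PySem.Chars.replace.go ['\t'] sp fuel l acc
      = acc.reverse ++ l.flatMap (fun c => if c = '\t' then sp else [c]) := by
  induction fuel generalizing l acc with
  | zero =>
    have : l = [] := List.eq_nil_of_length_eq_zero (by omega)
    subst this
    simp [PySem.Chars.replace.go]
  | succ n ih =>
    cases l with
    | nil => simp [PySem.Chars.replace.go]
    | cons c r =>
      rw [PySem.Chars.replace.go]
      by_cases hc : c = '\t'
      · subst hc
        rw [if_pos (by simp [List.isPrefixOf])]
        simp only [List.length_singleton, List.drop_succ_cons, List.drop_zero]
        rw [ih r _ (by simpa using h)]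
        simp
      · rw [if_neg (by simp [List.isPrefixOf]; exact fun hh => hc hh.symm)]
        rw [ih r _ (by simpa using h)]
        simp [hc]

-- B's scan at tab_size = 1 is the same per-character map
theorem altGo_one (sp : List Char) (l : List Char) (col : Int) :
    replTabsAltGo 1 sp l col = l.flatMap (fun c => if c = '\t' then sp else [c]) := by
  induction l generalizing col with
  | nil => rfl
  | cons c r ih =>
    rw [replTabsAltGo]
    by_cases hc : c = '\t'
    · rw [if_pos hc, hc]
      have hfd : PySem.Int.floordiv col 1 = col := by
        rw [PySem.Int.floordiv_eq_ediv_of_pos (by norm_num)]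
        omega
      rw [hfd]
      simp [PySem.List.pyRepeat, ih]
    · rw [if_neg hc, ih]
      simp [hc]

-- ===== VERDICT (by name: the statement is the Claim_ definition above) =====
theorem repl_tabs_spec : Claim_equal_repl_tabs := by
  intro s ts sp _ _
  unfold Spec_repl_tabs repl_tabs repl_tabs_alt
  dsimp only
  by_cases h1 : ts = 1
  · subst h1
    rw [if_pos rfl]
    apply String.toList_injective
    rw [String.toList_ofList]
    have hrep : (PySem.Str.replace s "\t" sp).toList
        = PySem.Chars.replace s.toList ("\t" : String).toList sp.toList := by
      simp [pysem]
    rw [hrep, altGo_one]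
    have ht : ("\t" : String).toList = ['\t'] := by decide
    rw [ht, PySem.Chars.replace, if_neg (by decide)]
    rw [replace_go_tab sp.toList s.toList s.toList.length [] le_rfl]
    simp
  · rw [if_neg h1]
    by_cases htab : '\t' ∈ s.toList
    · -- at least one tab: the loop runs at least once, parts ends nonempty
      have hfind : ¬ PySem.Chars.findFrom s.toList ['\t'] ((0 : Nat) : Int) = -1 := by
        rw [PySem.Chars.findFrom_natCast_eq_neg_one_iff s.toList ['\t'] 0 (Nat.zero_le _)]
        simp only [List.drop_zero, not_not]
        exact (List.singleton_infix_iff _ _).mpr htab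
      have hne : (replTabsLoop s.toList sp.toList ts 0 0 []).2.2 ≠ [] := by
        rw [replTabsLoop, dif_pos (Nat.zero_le _), dif_neg (by exact_mod_cast hfind)]
        exact loop_parts_ne_nil _ _ _ _ _ _ (List.append_ne_nil_of_right_ne_nil _ (by simp))
      rw [if_neg hne]
      have hmain := loop_eq_altGo s.toList sp.toList ts 0 0 [] (Nat.zero_le _)
      simp only [List.flatten_nil, List.nil_append, List.drop_zero] at hmain
      apply String.toList_injective
      rw [String.toList_ofList, String.toList_ofList, ← hmain, join_empty_sep]
      by_cases hlt : (replTabsLoop s.toList sp.toList ts 0 0 []).2.1 = s.toList.length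
      · rw [if_neg (by simp [hlt]), hlt]
        simp
      · rw [if_pos hlt]
        simp [PySem.List.slice_from_natCast]
    · -- no tab anywhere: the loop exits at once and A returns the string unchanged
      have hfind : PySem.Chars.findFrom s.toList ['\t'] ((0 : Nat) : Int) = -1 := by
        rw [PySem.Chars.findFrom_natCast_eq_neg_one_iff s.toList ['\t'] 0 (Nat.zero_le _)]
        simp only [List.drop_zero]
        exact fun hm => htab ((List.singleton_infix_iff _ _).mp hm)
      have hloop : replTabsLoop s.toList sp.toList ts 0 0 [] = (0, 0, []) := by
        rw [replTabsLoop, dif_pos (Nat.zero_le _), dif_pos (by exact_mod_cast hfind)]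
      rw [hloop, altGo_no_tab ts sp.toList s.toList 0 htab, String.ofList_toList]
      simp
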